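-- pv_equiv track=rewrite | github.com/mcviz/mcviz | mcviz/graph/loaders/hepmc.py | event_generator
-- ===== SOURCE A (Python) =====
-- def event_generator(lines):
--     """
--     Yield one event at a time from a HepMC file
--     """
--     event = []
--     for line in (l.split() for l in lines):
--         if line[0] == "E" and event:
--             yield event
--             event = []
--         event.append(line)
--     yield event
-- ===== SOURCE B (Python) =====
-- def event_generator(lines):
--     """
--     Yield one event at a time from a HepMC file
--     """
--     toks = [l.split() for l in lines]
--     start = 0
--     for i, t in enumerate(toks):
--         if i and t[0] == "E":
--             yield toks[start:i]
--             start = i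
--     yield toks[start:]
-- ===== Notes on version B (the rewrite author's own statement) =====
-- stated objective: alternative
-- what changed: B replaces A's grow-an-accumulator loop (append each split line to a mutable event, flush on 'E') by a single index pass that records event boundaries and yields slices toks[start:i] of the pre-split list.
import Mathlib
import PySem

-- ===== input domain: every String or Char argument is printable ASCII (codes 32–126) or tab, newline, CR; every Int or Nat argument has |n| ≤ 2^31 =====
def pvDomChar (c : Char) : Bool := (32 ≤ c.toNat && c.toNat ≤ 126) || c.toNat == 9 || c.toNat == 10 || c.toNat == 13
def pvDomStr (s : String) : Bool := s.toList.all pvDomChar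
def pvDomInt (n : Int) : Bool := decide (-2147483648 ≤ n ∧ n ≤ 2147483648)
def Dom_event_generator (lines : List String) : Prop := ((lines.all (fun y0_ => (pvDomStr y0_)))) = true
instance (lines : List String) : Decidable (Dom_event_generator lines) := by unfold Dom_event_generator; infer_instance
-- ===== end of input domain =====

-- B groups lines into events by recording boundary indices and slicing, instead of A's
-- grow-and-flush accumulator; return values agree on Pre_ (no whitespace-only lines).

-- ===== PORT A =====
-- A: event = []; for line in (l.split() for l in lines): if line[0]=="E" and event: yield event; event=[]
--    event.append(line); yield event.  (generator collected to a list)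
def event_generator (lines : List String) : List (List (List String)) :=
  let st := lines.foldl
    (fun (st : List (List (List String)) × List (List String)) l =>
      let line := PySem.Str.split₀ l
      if PySem.List.pyGet? line 0 = some "E" ∧ st.2 ≠ [] then
        (st.1 ++ [st.2], [line])
      else
        (st.1, st.2 ++ [line]))
    ([], [])
  st.1 ++ [st.2]

-- ===== PORT B =====
-- B: toks = [l.split() for l in lines]; start = 0
--    for i, t in enumerate(toks): if i and t[0]=="E": yield toks[start:i]; start = i
--    yield toks[start:]
def event_generator_alt (lines : List String) : List (List (List String)) :=
  let toks := lines.map PySem.Str.split₀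
  let st := (PySem.List.enumerate toks 0).foldl
    (fun (st : List (List (List String)) × Int) it =>
      if it.1 ≠ 0 ∧ PySem.List.pyGet? it.2 0 = some "E" then
        (st.1 ++ [PySem.List.slice toks (some st.2) (some it.1)], it.1)
      else st)
    ([], (0 : Int))
  st.1 ++ [PySem.List.slice toks (some st.2) none]

-- ===== PRECONDITION & SPEC =====
-- Pre_ excludes exactly the inputs where Python A raises IndexError: lines whose split() is empty.
def Pre_event_generator (lines : List String) : Prop :=
  ∀ l ∈ lines, PySem.Str.split₀ l ≠ []
instance (lines : List String) : Decidable (Pre_event_generator lines) := by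
  unfold Pre_event_generator; infer_instance
def pvWitness_event_generator : List String := ["E 1 2", "P 3 4", "E 5"]

def Spec_event_generator (lines : List String) (out : List (List (List String))) : Prop := out = event_generator_alt lines
instance (lines : List String) (out : List (List (List String))) : Decidable (Spec_event_generator lines out) := by unfold Spec_event_generator; infer_instance

-- ===== CLAIM (what is proved, stated in full; the proofs are below) =====
def Claim_equal_event_generator : Prop := ∀ (lines : List String), Dom_event_generator lines → Pre_event_generator lines → Spec_event_generator lines (event_generator lines)

-- ===== LEMMAS AND PROOFS =====

-- common specification of the grouping, recursion on the token lists
def evLoop (out : List (List (List String))) (cur : List (List String)) :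
    List (List String) → List (List (List String))
  | [] => out ++ [cur]
  | t :: ts =>
      if PySem.List.pyGet? t 0 = some "E" ∧ cur ≠ [] then
        evLoop (out ++ [cur]) [t] ts
      else
        evLoop out (cur ++ [t]) ts

lemma evA_eq (ts : List (List String)) :
    ∀ (out : List (List (List String))) (cur : List (List String)),
    (let st := ts.foldl
      (fun (st : List (List (List String)) × List (List String)) line =>
        if PySem.List.pyGet? line 0 = some "E" ∧ st.2 ≠ [] then
          (st.1 ++ [st.2], [line])
        else
          (st.1, st.2 ++ [line])) (out, cur)
     st.1 ++ [st.2]) = evLoop out cur ts := by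
  induction ts with
  | nil => intro out cur; simp [evLoop]
  | cons t ts ih =>
      intro out cur
      simp only [List.foldl_cons, evLoop]
      by_cases h : PySem.List.pyGet? t 0 = some "E" ∧ cur ≠ []
      · simp only [if_pos h]; exact ih _ _
      · simp only [if_neg h]; exact ih _ _

lemma evB_eq (toks : List (List String)) :
    ∀ (rest : List (List String)) (k s : Nat) (out : List (List (List String))),
    toks.drop k = rest → (s < k ∨ (s = 0 ∧ k = 0)) →
    (let st := (PySem.List.enumerate rest (k : Int)).foldl
      (fun (st : List (List (List String)) × Int) it =>
        if it.1 ≠ 0 ∧ PySem.List.pyGet? it.2 0 = some "E" then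
          (st.1 ++ [PySem.List.slice toks (some st.2) (some it.1)], it.1)
        else st) (out, (s : Int))
     st.1 ++ [PySem.List.slice toks (some st.2) none]) =
    evLoop out (PySem.List.slice toks (some (s : Int)) (some (k : Int))) rest := by
  intro rest
  induction rest generalizing toks with
  | nil =>
      intro k s out hdrop hsk
      have hlen : toks.length ≤ k := List.drop_eq_nil_iff.mp hdrop
      rw [PySem.List.enumerate_nil]
      simp only [List.foldl_nil]
      rw [PySem.List.slice_natCast, PySem.List.slice_from_natCast]
      show _ ++ [List.drop s toks] = evLoop out _ []
      unfold evLoop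
      rw [List.take_of_length_le (by simp only [List.length_drop]; omega)]
  | cons t ts ih =>
      intro k s out hdrop hsk
      have hk : k < toks.length := by
        by_contra h
        have hnil : toks.drop k = [] := List.drop_eq_nil_iff.mpr (by omega)
        exact List.cons_ne_nil t ts ((hnil.symm.trans hdrop).symm)
      have hs : s ≤ k := by omega
      have htk : toks[k]? = some t := by
        have h0 : (toks.drop k)[0]? = some t := by rw [hdrop]; rfl
        rw [List.getElem?_drop] at h0
        simpa using h0
      have hdrop' : toks.drop (k + 1) = ts := by
        have h := congrArg List.tail hdrop
        rw [List.tail_drop] at h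
        simpa using h
      rw [PySem.List.enumerate_cons, List.foldl_cons]
      simp only [evLoop]
      by_cases hE : PySem.List.pyGet? t 0 = some "E"
      · by_cases hk0 : k = 0
        · -- first line: no boundary; cur is empty slice
          subst hk0
          have hs0 : s = 0 := by omega
          subst hs0
          have hcur : PySem.List.slice toks (some ((0:Nat) : Int)) (some ((0:Nat) : Int)) = ([] : List (List String)) := by
            rw [PySem.List.slice_natCast]; simp
          rw [hcur]
          rw [if_neg (by simp), if_neg (by simp)]
          have h1 : ((0:Nat) : Int) + 1 = ((1:Nat) : Int) := by norm_num
          rw [h1]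
          have := ih toks 1 0 out hdrop' (by omega)
          simp only at this
          rw [this]
          congr 1
          rw [PySem.List.slice_natCast]
          have hd0 : toks.drop 0 = t :: ts := hdrop
          simp [hd0]
        · -- boundary: flush current slice, start = k
          have hsklt : s < k := by omega
          have hcurne : PySem.List.slice toks (some (s : Int)) (some (k : Int)) ≠ ([] : List (List String)) := by
            rw [PySem.List.slice_natCast]
            intro hnil
            have := congrArg List.length hnil
            simp at this
            omega
          rw [if_pos ⟨by exact_mod_cast hk0, hE⟩, if_pos ⟨hE, hcurne⟩]
          have h1 : (k : Int) + 1 = ((k+1 : Nat) : Int) := by push_cast; ring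
          rw [h1]
          have := ih toks (k+1) k (out ++ [PySem.List.slice toks (some (s:Int)) (some (k:Int))]) hdrop' (by omega)
          simp only at this
          rw [this]
          congr 1
          rw [PySem.List.slice_natCast]
          have hd : toks.drop k = t :: ts := hdrop
          have h11 : k + 1 - k = 1 := by omega
          rw [h11, hd]
          rfl
      · -- not an 'E' line: extend current event
        rw [if_neg (by tauto), if_neg (by tauto)]
        have h1 : (k : Int) + 1 = ((k+1 : Nat) : Int) := by push_cast; ring
        rw [h1]
        have := ih toks (k+1) s out hdrop' (by omega)
        simp only at this
        rw [this]
        congr 1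
        rw [PySem.List.slice_natCast, PySem.List.slice_natCast]
        have hstep : k + 1 - s = (k - s) + 1 := by omega
        rw [hstep, List.take_add_one]
        have hts : (toks.drop s)[k - s]? = some t := by
          rw [List.getElem?_drop]
          have hks : s + (k - s) = k := by omega
          rw [hks]
          exact htk
        simp [hts]

-- ===== VERDICT (by name: the statement is the Claim_ definition above) =====
theorem event_generator_spec : Claim_equal_event_generator := by
  intro lines _ _
  unfold Spec_event_generator event_generator event_generator_alt
  have hA := evA_eq (lines.map PySem.Str.split₀) [] []
  simp only [List.foldl_map] at hA
  rw [hA]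
  have hB := evB_eq (lines.map PySem.Str.split₀) (lines.map PySem.Str.split₀) 0 0 [] (by simp) (by omega)
  simp only [Nat.cast_zero] at hB
  have hnil : PySem.List.slice (lines.map PySem.Str.split₀) (some 0) (some 0) = ([] : List (List String)) := by
    simp [PySem.List.slice_to]
  rw [hnil] at hB
  rw [hB]
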